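-- pv_equiv track=rewrite | github.com/lao-ni/UNSW-COMP9021 | assignment2/frieze.py | findperiod
-- ===== SOURCE A (Python) =====
-- def findperiod(list):
--     period=0
--     for i in range(1,len(list[0])//2+1):
--         found=True
--         for line in list:
--             for j in range(len(line)-i-1):
--                 if line[j]!=line[j+i]:
--                     found=False
--                     break
--             if found==False:
--                 break
--         if found==True:
--             period=i
--             break
--     return period
-- ===== SOURCE B (Python) =====
-- def findperiod(list):
--     # A shift i is accepted for a line iff line[j] == line[j+i] for all
--     # j in range(len(line)-i-1), i.e. iff t[i:] == t[:-i] for t = line[:-1].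
--     # Filter the candidate shifts through every line, return the smallest survivor.
--     candidates = range(1, len(list[0]) // 2 + 1)
--     for line in list:
--         t = line[:-1]
--         candidates = [i for i in candidates if t[i:] == t[:-i]]
--     return candidates[0] if candidates else 0
-- ===== Notes on version B (the rewrite author's own statement) =====
-- stated objective: alternative
-- what changed: Instead of re-scanning every line character by character for each candidate shift with early breaks, B makes a single pass over the lines, filtering the set of candidate shifts with one slice comparison t[i:] == t[:-i] per shift, and returns the smallest survivor.
-- outside the precondition, e.g. on findperiod([]): A raises IndexError, B raises IndexError
import Mathlib
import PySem

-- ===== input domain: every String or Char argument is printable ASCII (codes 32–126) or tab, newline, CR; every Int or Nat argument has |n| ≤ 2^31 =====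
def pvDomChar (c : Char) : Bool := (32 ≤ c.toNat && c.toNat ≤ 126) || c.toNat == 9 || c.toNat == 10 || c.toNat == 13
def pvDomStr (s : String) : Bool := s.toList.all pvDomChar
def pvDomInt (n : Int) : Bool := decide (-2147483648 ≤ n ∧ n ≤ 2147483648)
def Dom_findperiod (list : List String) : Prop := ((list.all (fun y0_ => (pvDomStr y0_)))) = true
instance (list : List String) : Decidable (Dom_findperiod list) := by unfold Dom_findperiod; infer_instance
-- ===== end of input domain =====

-- B replaces A's per-shift character-by-character rescan of every line by a single pass over the
-- lines that filters the candidate shift set with one slice comparison per shift (objective: alternative).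

-- ===== PORT A =====
-- inner loop 'for j in range(len(line)-i-1): if line[j]!=line[j+i]: found=False; break'
-- (Nat subtraction matches Python's empty range when len(line)-i-1 ≤ 0; indices j, j+i are
-- always in range here, so getD with a default is exact)
def findperiodLineOK (line : List Char) (i : Nat) : Bool :=
  (List.range (line.length - i - 1)).all (fun j => line.getD j ' ' == line.getD (j + i) ' ')

-- outer loop 'for i in range(1, len(list[0])//2+1): … if found==True: period=i; break':
-- first i passing all lines, else the initial period=0
def findperiodLoop (lines : List (List Char)) : List Nat → Int
  | [] => 0
  | i :: rest =>
    if lines.all (fun line => findperiodLineOK line i) then (i : Int)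
    else findperiodLoop lines rest

def findperiod (list : List String) : Int :=
  -- list[0] raises IndexError on []: excluded by Pre_; len(list[0])//2 on Nat is exact (both nonnegative)
  findperiodLoop (list.map (fun s => s.toList))
    (List.range' 1 ((list.headD "").toList.length / 2))

-- ===== PORT B =====
def findperiod_alt (list : List String) : Int :=
  let cands :=
    list.foldl (fun cs line =>
      let t := PySem.List.slice line.toList none (some (-1))            -- t = line[:-1]
      cs.filter (fun i =>
        PySem.List.slice t (some ((i : Nat) : Int)) none                -- t[i:]
          == PySem.List.slice t none (some (-((i : Nat) : Int)))))      -- t[:-i]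
      (List.range' 1 ((list.headD "").toList.length / 2))
  match cands with
  | [] => 0
  | c :: _ => (c : Int)

-- ===== PRECONDITION & SPEC =====
-- A (and B) evaluate list[0], which raises IndexError on the empty list.
def Pre_findperiod (list : List String) : Prop := list ≠ []
instance (list : List String) : Decidable (Pre_findperiod list) := by unfold Pre_findperiod; infer_instance
def pvWitness_findperiod : List String := ["abab", "cdcd"]

def Spec_findperiod (list : List String) (out : Int) : Prop := out = findperiod_alt list
instance (list : List String) (out : Int) : Decidable (Spec_findperiod list out) := by unfold Spec_findperiod; infer_instance

-- ===== CLAIM (what is proved, stated in full; the proofs are below) =====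
def Claim_equal_findperiod : Prop := ∀ (list : List String), Dom_findperiod list → Pre_findperiod list → Spec_findperiod list (findperiod list)

-- ===== LEMMAS AND PROOFS =====

-- a list equals its shift-by-i overlap iff all characters i apart agree
lemma drop_eq_take_iff (t : List Char) (i : Nat) :
    t.drop i = t.take (t.length - i) ↔
      ∀ j (h : j < t.length - i), t[j]'(by omega) = t[j+i]'(by omega) := by
  constructor
  · intro heq j h
    have := congrArg (fun l => l[j]?) heq
    simp only [List.getElem?_drop] at this
    rw [List.getElem?_take_of_lt h] at this
    rw [List.getElem?_eq_getElem (by omega), List.getElem?_eq_getElem (by omega)] at this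
    have := Option.some.inj this
    simp only [Nat.add_comm i j] at this
    exact this.symm
  · intro hp
    apply List.ext_getElem
    · simp
    · intro j h1 h2
      rw [List.getElem_drop, List.getElem_take]
      simp only [Nat.add_comm i j]
      exact (hp j (by simpa using h2)).symm

-- A's inner check on a line = B's overlap comparison on t = line.dropLast
lemma lineOK_aux (line : List Char) (i : Nat) :
    ((List.range (line.length - i - 1)).all
        (fun j => line.getD j ' ' == line.getD (j + i) ' '))
      = (line.dropLast.drop i == line.dropLast.take (line.dropLast.length - i)) := by
  have hn : line.dropLast.length = line.length - 1 := by simp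
  rw [Bool.eq_iff_iff, List.all_eq_true, beq_iff_eq, drop_eq_take_iff]
  constructor
  · intro hall j h
    rw [hn] at h
    have hj : j < line.length := by omega
    have hji : j + i < line.length := by omega
    have := hall j (by rw [List.mem_range]; omega)
    rw [beq_iff_eq, List.getD_eq_getElem line ' ' hj, List.getD_eq_getElem line ' ' hji] at this
    rw [List.getElem_dropLast, List.getElem_dropLast]
    exact this
  · intro hp j hj
    rw [List.mem_range] at hj
    have hj' : j < line.dropLast.length - i := by omega
    have := hp j hj'
    rw [List.getElem_dropLast, List.getElem_dropLast] at this
    rw [beq_iff_eq, List.getD_eq_getElem line ' ' (by omega), List.getD_eq_getElem line ' ' (by omega)]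
    exact this

-- A's check = B's slice comparison, for shifts i ≥ 1
lemma lineOK_eq_slicePred (line : String) (i : Nat) (hi : 1 ≤ i) :
    findperiodLineOK line.toList i
      = (PySem.List.slice (PySem.List.slice line.toList none (some (-1))) (some ((i : Nat) : Int)) none
          == PySem.List.slice (PySem.List.slice line.toList none (some (-1))) none (some (-((i : Nat) : Int)))) := by
  rw [PySem.List.slice_to_neg_one, PySem.List.slice_from_natCast,
      PySem.List.slice_to_neg_natCast _ _ hi]
  exact lineOK_aux line.toList i

-- folding a filter over the lines = one filter by the conjunction over the lines
lemma foldl_filter_eq {α β : Type} (p : β → α → Bool) (lines : List β) (cs : List α) :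
    lines.foldl (fun cs l => cs.filter (p l)) cs
      = cs.filter (fun i => lines.all (fun l => p l i)) := by
  induction lines generalizing cs with
  | nil => simp
  | cons l ls ih =>
      simp only [List.foldl_cons, ih, List.filter_filter, List.all_cons]
      exact List.filter_congr (fun a _ => Bool.and_comm _ _)

-- A's outer first-hit loop = head-or-0 of the filtered candidate list
lemma loop_eq_head (list : List String) (cs : List Nat) (h1 : ∀ i ∈ cs, 1 ≤ i) :
    findperiodLoop (list.map (fun s => s.toList)) cs
      = (match cs.filter (fun i => list.all (fun line =>
            PySem.List.slice (PySem.List.slice line.toList none (some (-1))) (some ((i : Nat) : Int)) none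
              == PySem.List.slice (PySem.List.slice line.toList none (some (-1))) none (some (-((i : Nat) : Int))))) with
         | [] => (0 : Int)
         | c :: _ => (c : Int)) := by
  induction cs with
  | nil => simp [findperiodLoop]
  | cons c rest ih =>
      have hc : 1 ≤ c := h1 c (by simp)
      have hall : ((list.map (fun s => s.toList)).all (fun line => findperiodLineOK line c))
          = list.all (fun line =>
              PySem.List.slice (PySem.List.slice line.toList none (some (-1))) (some ((c : Nat) : Int)) none
                == PySem.List.slice (PySem.List.slice line.toList none (some (-1))) none (some (-((c : Nat) : Int)))) := by
        rw [List.all_map]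
        congr 1
        funext line
        exact lineOK_eq_slicePred line c hc
      rw [findperiodLoop, hall, List.filter_cons]
      by_cases h : (list.all (fun line =>
            PySem.List.slice (PySem.List.slice line.toList none (some (-1))) (some ((c : Nat) : Int)) none
              == PySem.List.slice (PySem.List.slice line.toList none (some (-1))) none (some (-((c : Nat) : Int))))) = true
      · rw [if_pos h, if_pos h]
      · rw [if_neg h, if_neg h]
        exact ih (fun i hi => h1 i (by simp [hi]))

-- ===== VERDICT (by name: the statement is the Claim_ definition above) =====
theorem findperiod_spec : Claim_equal_findperiod := by
  intro list _ _
  unfold Spec_findperiod findperiod findperiod_alt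
  rw [loop_eq_head list _ (fun i hi => by
    rw [List.mem_range'_1] at hi; exact hi.1)]
  simp only [foldl_filter_eq]
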